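-- pv_equiv track=rewrite | github.com/padresmurfa/yapl | v4/lexer/shared/tokenized_lines/builder.py | infix_comparison_operator
-- ===== SOURCE A (Python) =====
-- def _specific_symbol(o, logical_line_contents, tokens, token_name):
--     if logical_line_contents.startswith(o):
--         logical_line_contents = logical_line_contents[len(o):]
--         tokens.append({
--             "token": token_name,
--             "value": o
--         })
--     return logical_line_contents
--
-- def infix_comparison_operator(logical_line_contents, tokens):
--     for o in (
--         "==", ">=", "!=", "<=", "<", ">"
--     ):
--         before = logical_line_contents
--         after = _specific_symbol(o, logical_line_contents, tokens, "INFIX_COMPARISON_OPERATOR")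
--         if before != after:
--             return after
--     return logical_line_contents
-- ===== SOURCE B (Python) =====
-- def infix_comparison_operator(logical_line_contents, tokens):
--     s = logical_line_contents
--     c0 = s[0] if s else ""
--     eq_next = len(s) >= 2 and s[1] == "="
--     if c0 == "<" or c0 == ">":
--         n = 2 if eq_next else 1
--     elif (c0 == "=" or c0 == "!") and eq_next:
--         n = 2
--     else:
--         return s
--     tokens.append({"token": "INFIX_COMPARISON_OPERATOR", "value": s[:n]})
--     return s[n:]
-- ===== Notes on version B (the rewrite author's own statement) =====
-- stated objective: alternative
-- what changed: Drops the operator table and the _specific_symbol scanning loop entirely: B classifies the first character ('<'/'>' vs '='/'!') and computes the operator length arithmetically from whether the second character is '=', then slices once.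
import Mathlib
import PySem

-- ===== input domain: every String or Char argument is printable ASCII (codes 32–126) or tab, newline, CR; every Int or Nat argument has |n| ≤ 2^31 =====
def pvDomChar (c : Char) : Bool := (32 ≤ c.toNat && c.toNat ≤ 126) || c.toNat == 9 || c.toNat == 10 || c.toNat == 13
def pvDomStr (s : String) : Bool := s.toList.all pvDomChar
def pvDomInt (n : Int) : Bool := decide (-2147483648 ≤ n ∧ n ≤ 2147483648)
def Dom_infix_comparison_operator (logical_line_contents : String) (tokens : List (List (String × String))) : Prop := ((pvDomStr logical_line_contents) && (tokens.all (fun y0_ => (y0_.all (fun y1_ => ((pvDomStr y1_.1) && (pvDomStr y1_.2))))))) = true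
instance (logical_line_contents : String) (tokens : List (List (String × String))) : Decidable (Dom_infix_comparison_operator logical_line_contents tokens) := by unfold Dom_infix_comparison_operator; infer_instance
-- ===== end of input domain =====

-- B replaces A's six-operator table scan (with its _specific_symbol helper and
-- before/after comparison) by character classification: inspect the first character
-- ('<'/'>' vs '='/'!') and derive the operator length from whether the second
-- character is '=' (objective: alternative, no operator table).
-- A and B both append the same token dict to `tokens` in place; the equivalence proved
-- here is about the RETURN value only (the mutation is identical in the two Pythons).


-- ===== PORT A =====
-- _specific_symbol: strip the operator if it is a prefix (token append is a side effect
-- on `tokens`, not part of the returned value; kept out of the pure port).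
def pvSpecificSymbolA (o : List Char) (cs : List Char) : List Char :=
  if PySem.Chars.startswith cs o then PySem.List.slice cs (some (o.length : Int)) none
  else cs

-- the `for o in (...)` loop with its `before != after` early return
def pvLoopA : List (List Char) → List Char → List Char
  | [], cs => cs
  | o :: rest, cs =>
    let before := cs
    let after := pvSpecificSymbolA o cs
    if before ≠ after then after else pvLoopA rest cs

def infix_comparison_operator (logical_line_contents : String) (tokens : List (List (String × String))) : String :=
  String.ofList (pvLoopA
    ["==".toList, ">=".toList, "!=".toList, "<=".toList, "<".toList, ">".toList]
    logical_line_contents.toList)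

-- ===== PORT B =====
-- Source B's `s[0] if s else ""` / `len(s) >= 2 and s[1] == "="` on the char list;
-- `s[n:]` for n ∈ {1,2} is PySem.List.slice with a nonnegative start (exact).
def pvClassifyB (cs : List Char) : List Char :=
  let c0 : Option Char := cs.head?                         -- s[0] if s else ""
  let eq_next : Bool := decide (2 ≤ cs.length) && (PySem.List.pyGetD cs 1 ' ' == '=')
  if c0 = some '<' ∨ c0 = some '>' then
    let n : Int := if eq_next then 2 else 1
    PySem.List.slice cs (some n) none                      -- s[n:]
  else if (c0 = some '=' ∨ c0 = some '!') ∧ eq_next then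
    PySem.List.slice cs (some 2) none
  else cs                                                  -- return s unchanged

def infix_comparison_operator_alt (logical_line_contents : String) (tokens : List (List (String × String))) : String :=
  String.ofList (pvClassifyB logical_line_contents.toList)

-- ===== PRECONDITION & SPEC =====
def Spec_infix_comparison_operator (logical_line_contents : String) (tokens : List (List (String × String))) (out : String) : Prop := out = infix_comparison_operator_alt logical_line_contents tokens
instance (logical_line_contents : String) (tokens : List (List (String × String))) (out : String) : Decidable (Spec_infix_comparison_operator logical_line_contents tokens out) := by unfold Spec_infix_comparison_operator; infer_instance

-- ===== CLAIM (what is proved, stated in full; the proofs are below) =====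
def Claim_equal_infix_comparison_operator : Prop := ∀ (logical_line_contents : String) (tokens : List (List (String × String))), Dom_infix_comparison_operator logical_line_contents tokens → Spec_infix_comparison_operator logical_line_contents tokens (infix_comparison_operator logical_line_contents tokens)

-- ===== LEMMAS AND PROOFS =====

-- one step of A's loop: the `before != after` test fires exactly when the (nonempty)
-- operator is a prefix, and then the result is the string with that prefix dropped
theorem pvLoopA_cons (o : List Char) (ho : o ≠ []) (rest : List (List Char)) (cs : List Char) :
    pvLoopA (o :: rest) cs =
      if PySem.Chars.startswith cs o then cs.drop o.length
      else pvLoopA rest cs := by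
  by_cases h : PySem.Chars.startswith cs o
  · have hpre : o <+: cs := by
      simpa [PySem.Chars.startswith, List.isPrefixOf_iff_prefix] using h
    have hlen : o.length ≤ cs.length := hpre.length_le
    have hne : cs ≠ cs.drop o.length := by
      intro he
      have h1 : cs.length = cs.length - o.length := by
        conv_lhs => rw [he]
        simp
      have h0 : 0 < o.length := List.length_pos_of_ne_nil ho
      omega
    simp [pvLoopA, pvSpecificSymbolA, h, PySem.List.slice_from_natCast, hne]
  · simp [pvLoopA, pvSpecificSymbolA, h]

-- dropping a matched prefix, stated for the two slice lengths B uses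
theorem pvSlice2 (x y : Char) (r : List Char) :
    PySem.List.slice (x :: y :: r) (some 2) none = r := by
  rw [PySem.List.slice_from _ (by norm_num : (0:Int) ≤ 2)]; rfl

theorem pvSlice1 (x : Char) (r : List Char) :
    PySem.List.slice (x :: r) (some 1) none = r := by
  rw [PySem.List.slice_from _ (by norm_num : (0:Int) ≤ 1)]; rfl

-- core fact on the char-list side: A's six-operator scan equals B's
-- character-classification, by case split on up to two leading characters
set_option maxHeartbeats 2000000 in
theorem pvLoopA_eq_alt (cs : List Char) :
    pvLoopA ["==".toList, ">=".toList, "!=".toList, "<=".toList, "<".toList, ">".toList] cs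
      = pvClassifyB cs := by
  match cs with
  | [] => decide
  | [c] =>
    rw [pvLoopA_cons _ (by decide), pvLoopA_cons _ (by decide), pvLoopA_cons _ (by decide),
        pvLoopA_cons _ (by decide), pvLoopA_cons _ (by decide), pvLoopA_cons _ (by decide)]
    simp [pvLoopA, pvClassifyB, PySem.Chars.startswith, List.isPrefixOf, PySem.List.pyGetD,
      PySem.List.pyGet?, PySem.List.pyIdx?, pvSlice1]
    split_ifs <;> first | rfl | tauto
  | c :: d :: t =>
    rw [pvLoopA_cons _ (by decide), pvLoopA_cons _ (by decide), pvLoopA_cons _ (by decide),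
        pvLoopA_cons _ (by decide), pvLoopA_cons _ (by decide), pvLoopA_cons _ (by decide)]
    by_cases hd : d = '='
    · subst hd
      simp [pvLoopA, pvClassifyB, PySem.Chars.startswith, List.isPrefixOf, PySem.List.pyGetD,
        PySem.List.pyGet?, PySem.List.pyIdx?, pvSlice2]
      split_ifs <;> first | rfl | tauto
    · simp [pvLoopA, pvClassifyB, PySem.Chars.startswith, List.isPrefixOf, PySem.List.pyGetD,
        PySem.List.pyGet?, PySem.List.pyIdx?, hd, pvSlice1]
      split_ifs <;> first | rfl | tauto

-- ===== VERDICT (by name: the statement is the Claim_ definition above) =====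
theorem infix_comparison_operator_spec : Claim_equal_infix_comparison_operator := by
  intro s tokens _
  show infix_comparison_operator s tokens = infix_comparison_operator_alt s tokens
  simp only [infix_comparison_operator, infix_comparison_operator_alt]
  rw [pvLoopA_eq_alt]
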